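-- pv_equiv track=rewrite | github.com/johnhuh619/Baekjoon | 프로그래머스/2/340212. ［PCCP 기출문제］ 2번 ／ 퍼즐 게임 챌린지/［PCCP 기출문제］ 2번 ／ 퍼즐 게임 챌린지.py | solution
-- ===== SOURCE A (Python) =====
-- def solution(diffs, times, limit):
--     answer = 0
--     def simulator(level):
--
--         time_cnt = 0
--
--         for i in range(len(diffs)):
--             time_prev = times[i-1] if i != 0 else 0
--
--             # 1트
--             if diffs[i] <= level:
--                 time_cnt += times[i]
--
--             # N트
--             else:
--                 time_cnt += times[i] + (times[i] + time_prev) * (diffs[i] - level)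
--
--             # 시간 초과
--             if time_cnt > limit:
--                 return False
--
--         return True
--
--     top, down = max(diffs), 1
--     level = top
--     while top >= down:
--         mid = (top + down) // 2
--         if simulator(mid):
--             level = mid
--             top = mid - 1
--         else:
--             down = mid + 1
--
--     return level
-- ===== SOURCE B (Python) =====
-- def solution(diffs, times, limit):
--     # Feasibility, declaratively: per-level retry costs via zip, then the maximum
--     # prefix sum compared against limit (no early exit, no index arithmetic).
--     def feasible(level):
--         prevs = [0] + times[:len(diffs) - 1]
--         costs = [t if d <= level else t + (t + p) * (d - level)
--                  for d, t, p in zip(diffs, times, prevs)]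
--         sums = []
--         total = 0
--         for c in costs:
--             total += c
--             sums.append(total)
--         return max(sums) <= limit
--
--     # Binary search as structural recursion on the closed interval [down, top],
--     # carrying the best level found so far.
--     def search(down, top, best):
--         if down > top:
--             return best
--         mid = (down + top) // 2
--         if feasible(mid):
--             return search(down, mid - 1, mid)
--         return search(mid + 1, top, best)
--
--     top = max(diffs)
--     return search(1, top, top)
-- ===== Notes on version B (the rewrite author's own statement) =====
-- stated objective: alternative
-- what changed: Feasibility is recomputed declaratively (zip-built per-level cost list, running prefix sums, max compared against limit) instead of A's early-exit index loop, and the binary search becomes structural recursion on the interval carrying the best level instead of a while loop over mutable bounds.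
-- outside the precondition, e.g. on solution([1, 5, 5], [10], 5): A returns 5, B returns 5
import Mathlib
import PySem

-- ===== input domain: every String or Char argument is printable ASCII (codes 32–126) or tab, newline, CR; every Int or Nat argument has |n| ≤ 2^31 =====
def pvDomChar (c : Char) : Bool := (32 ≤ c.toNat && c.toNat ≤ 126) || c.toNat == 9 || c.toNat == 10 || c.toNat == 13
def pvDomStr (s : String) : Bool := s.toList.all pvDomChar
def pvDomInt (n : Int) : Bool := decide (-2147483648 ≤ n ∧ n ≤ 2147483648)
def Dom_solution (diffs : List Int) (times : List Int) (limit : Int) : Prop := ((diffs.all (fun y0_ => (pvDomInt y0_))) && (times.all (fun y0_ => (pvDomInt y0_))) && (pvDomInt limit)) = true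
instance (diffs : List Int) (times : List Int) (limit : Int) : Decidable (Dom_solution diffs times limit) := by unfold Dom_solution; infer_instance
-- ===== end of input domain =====

-- B restructures A: feasibility becomes a declarative max-prefix-sum test over zip-built
-- cost lists (instead of an early-exit index loop), and the binary search becomes
-- structural recursion carrying the best level (objective: alternative, not faster).

-- ===== PORT A =====
-- A's inner 'simulator': index loop with running time_cnt and early 'return False'.
-- fuel = diffs.length - i merely makes the loop total (structural recursion);
-- List.getD is exact here: Pre_solution keeps every accessed index in range.
def simA (diffs times : List Int) (limit level : Int) : Nat → Nat → Int → Bool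
  | 0, _, _ => true
  | fuel + 1, i, cnt =>
    if i < diffs.length then
      let time_prev : Int := if i ≠ 0 then times.getD (i - 1) 0 else 0
      let cnt' : Int :=
        if diffs.getD i 0 ≤ level then cnt + times.getD i 0
        else cnt + (times.getD i 0 + (times.getD i 0 + time_prev) * (diffs.getD i 0 - level))
      if cnt' > limit then false
      else simA diffs times limit level fuel (i + 1) cnt'
    else true

-- A's while loop over the closed interval [down, top] with the accumulator 'level'.
-- fuel bounds the iteration count (the interval width shrinks every turn); it only
-- makes the loop total and is never exhausted at the fuel solution passes in.
def loopA (diffs times : List Int) (limit : Int) : Nat → Int → Int → Int → Int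
  | 0, _, _, level => level
  | fuel + 1, top, down, level =>
    if top ≥ down then
      let mid := PySem.Int.floordiv (top + down) 2
      if simA diffs times limit mid diffs.length 0 0 then
        loopA diffs times limit fuel (mid - 1) down mid
      else loopA diffs times limit fuel top (mid + 1) level
    else level

def solution (diffs : List Int) (times : List Int) (limit : Int) : Int :=
  let top := (PySem.List.max? diffs (fun y => y)).getD 0  -- max(diffs); Pre_ excludes [], where Python raises
  loopA diffs times limit (top.toNat + 1) top 1 top

-- ===== PORT B =====
-- Source B: prevs = [0] + times[:len(diffs)-1]; costs by comprehension over zip.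
def costsB (diffs times : List Int) (level : Int) : List Int :=
  let prevs : List Int := 0 :: PySem.List.slice times none (some ((diffs.length : Int) - 1))
  (diffs.zip (times.zip prevs)).map
    (fun dtp => if dtp.1 ≤ level then dtp.2.1 else dtp.2.1 + (dtp.2.1 + dtp.2.2) * (dtp.1 - level))

-- Source B: the loop appending each running total to 'sums'.
def sumsB (costs : List Int) : List Int :=
  (costs.foldl (fun acc c => (acc.1 + c, acc.2 ++ [acc.1 + c])) ((0 : Int), ([] : List Int))).2

-- Source B: feasible(level) = max(sums) <= limit  (max([]) raises; Pre_ excludes empty diffs)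
def feasB (diffs times : List Int) (limit level : Int) : Bool :=
  (PySem.List.max? (sumsB (costsB diffs times level)) (fun y => y)).getD 0 ≤ limit

-- Source B: search(down, top, best), recursion on the interval; the fuel argument only
-- makes it total in Lean (the interval width shrinks every call).
def searchB (diffs times : List Int) (limit : Int) : Nat → Int → Int → Int → Int
  | 0, _, _, best => best
  | fuel + 1, down, top, best =>
    if down > top then best
    else
      let mid := PySem.Int.floordiv (down + top) 2
      if feasB diffs times limit mid then searchB diffs times limit fuel down (mid - 1) mid
      else searchB diffs times limit fuel (mid + 1) top best

def solution_alt (diffs : List Int) (times : List Int) (limit : Int) : Int :=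
  let top := (PySem.List.max? diffs (fun y => y)).getD 0
  searchB diffs times limit (top.toNat + 1) 1 top top

-- ===== PRECONDITION & SPEC =====
-- Pre_ excludes empty diffs (max(diffs) raises ValueError) and times shorter than diffs
-- (A's times[i] can raise IndexError); on the excluded inputs where A still returns
-- (early time-limit exit on every probe) B happens to agree, but A can raise there.
def Pre_solution (diffs : List Int) (times : List Int) (limit : Int) : Prop :=
  diffs ≠ [] ∧ diffs.length ≤ times.length
instance (diffs : List Int) (times : List Int) (limit : Int) : Decidable (Pre_solution diffs times limit) := by unfold Pre_solution; infer_instance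

def pvWitness_solution : List Int × List Int × Int := ([3, 2], [5, 4], 100)

def Spec_solution (diffs : List Int) (times : List Int) (limit : Int) (out : Int) : Prop := out = solution_alt diffs times limit
instance (diffs : List Int) (times : List Int) (limit : Int) (out : Int) : Decidable (Spec_solution diffs times limit out) := by unfold Spec_solution; infer_instance

-- ===== CLAIM (what is proved, stated in full; the proofs are below) =====
def Claim_equal_solution : Prop := ∀ (diffs : List Int) (times : List Int) (limit : Int), Dom_solution diffs times limit → Pre_solution diffs times limit → Spec_solution diffs times limit (solution diffs times limit)

-- ===== LEMMAS AND PROOFS =====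
-- A's early-exit loop, abstracted over the list of per-level costs.
def Fctr (limit : Int) : Int → List Int → Bool
  | _, [] => true
  | cnt, c :: cs => if cnt + c > limit then false else Fctr limit (cnt + c) cs

theorem costsB_length {diffs times : List Int} {level : Int}
    (hlen : diffs.length ≤ times.length) :
    (costsB diffs times level).length = diffs.length := by
  unfold costsB
  simp only [List.length_map, List.length_zip, List.length_cons]
  rcases Nat.eq_zero_or_pos diffs.length with h0 | h1
  · omega
  · rw [show ((diffs.length : Int) - 1) = ((diffs.length - 1 : Nat) : Int) by omega,
      PySem.List.slice_to_natCast]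
    simp only [List.length_take]
    omega

theorem costsB_getElem {diffs times : List Int} {level : Int} {i : Nat}
    (hlen : diffs.length ≤ times.length) (hi : i < diffs.length)
    (hc : i < (costsB diffs times level).length) :
    (costsB diffs times level)[i] =
      if diffs.getD i 0 ≤ level then times.getD i 0
      else times.getD i 0 + (times.getD i 0 + (if i ≠ 0 then times.getD (i - 1) 0 else 0)) *
        (diffs.getD i 0 - level) := by
  have hit : i < times.length := by omega
  have hprev : PySem.List.slice times none (some ((diffs.length : Int) - 1))
      = times.take (diffs.length - 1) := by
    rw [show ((diffs.length : Int) - 1) = ((diffs.length - 1 : Nat) : Int) by omega,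
      PySem.List.slice_to_natCast]
  unfold costsB
  simp only [hprev, List.getElem_map, List.getElem_zip]
  rcases i with _ | j
  · simp [hi, hit]
  · have hj : j < (times.take (diffs.length - 1)).length := by
      simp only [List.length_take]; omega
    simp only [List.getElem_cons_succ, List.getElem_take]
    simp [hi, hit, show j < times.length by omega]

theorem simA_eq_F (diffs times : List Int) (limit level : Int)
    (hlen : diffs.length ≤ times.length) :
    ∀ (fuel i : Nat) (cnt : Int), diffs.length ≤ i + fuel →
      simA diffs times limit level fuel i cnt =
        Fctr limit cnt ((costsB diffs times level).drop i) := by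
  intro fuel
  induction fuel with
  | zero =>
      intro i cnt hif
      have hd : (costsB diffs times level).drop i = [] := by
        apply List.drop_eq_nil_of_le; rw [costsB_length hlen]; omega
      rw [hd]; rfl
  | succ fuel ih =>
      intro i cnt hif
      by_cases h : i < diffs.length
      · have hc : i < (costsB diffs times level).length := by rw [costsB_length hlen]; exact h
        rw [List.drop_eq_getElem_cons hc, costsB_getElem hlen h hc]
        simp only [simA, if_pos h, Fctr]
        have hb : (if diffs.getD i 0 ≤ level then cnt + times.getD i 0
            else cnt + (times.getD i 0 + (times.getD i 0 + (if i ≠ 0 then times.getD (i - 1) 0 else 0)) *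
              (diffs.getD i 0 - level)))
          = cnt + (if diffs.getD i 0 ≤ level then times.getD i 0
            else times.getD i 0 + (times.getD i 0 + (if i ≠ 0 then times.getD (i - 1) 0 else 0)) *
              (diffs.getD i 0 - level)) := by
          split_ifs <;> ring
        rw [hb]
        split_ifs <;> first | rfl | exact ih (i + 1) _ (by omega)
      · have hd : (costsB diffs times level).drop i = [] := by
          apply List.drop_eq_nil_of_le; rw [costsB_length hlen]; omega
        rw [hd]
        simp only [simA, if_neg h, Fctr]

theorem Fctr_eq_true_iff (limit : Int) :
    ∀ (cs : List Int) (cnt : Int),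
      Fctr limit cnt cs = true ↔ ∀ j < cs.length, cnt + ((cs.take (j + 1)).sum) ≤ limit := by
  intro cs
  induction cs with
  | nil => simp [Fctr]
  | cons c cs ih =>
      intro cnt
      simp only [Fctr]
      split_ifs with h
      · simp only [false_iff, not_forall]
        refine ⟨0, by simp, by simp; omega⟩
      · rw [ih]
        constructor
        · intro hall j hj
          rcases j with _ | k
          · simp; omega
          · have := hall k (by simpa using hj)
            simpa [add_assoc] using this
        · intro hall j hj
          have := hall (j + 1) (by simpa using hj)
          simp only [List.take_succ_cons, List.sum_cons] at this
          omega

theorem sums_aux :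
    ∀ (cs : List Int) (t : Int) (acc : List Int),
      (cs.foldl (fun a c => (a.1 + c, a.2 ++ [a.1 + c])) (t, acc)).2
        = acc ++ (List.range cs.length).map (fun j => t + ((cs.take (j + 1)).sum)) := by
  intro cs
  induction cs with
  | nil => simp
  | cons c cs ih =>
      intro t acc
      simp only [List.foldl_cons, List.length_cons, List.range_succ_eq_map, List.map_cons,
        List.map_map]
      rw [ih]
      simp [Function.comp, add_assoc, List.append_assoc]

theorem sumsB_eq (cs : List Int) :
    sumsB cs = (List.range cs.length).map (fun j => (cs.take (j + 1)).sum) := by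
  unfold sumsB
  rw [sums_aux cs 0 []]
  simp

theorem max_le_iff_forall (x : Int) (t : List Int) (limit : Int) :
    ((PySem.List.max? (x :: t) (fun y => y)).getD 0 ≤ limit) ↔ ∀ y ∈ x :: t, y ≤ limit := by
  rw [PySem.List.max?_id_cons]
  simp only [Option.getD_some]
  constructor
  · intro h y hy
    rcases List.mem_cons.1 hy with rfl | hy
    · exact le_trans (PySem.List.le_foldl_max t y).1 h
    · exact le_trans ((PySem.List.le_foldl_max t x).2 y hy) h
  · intro h
    rcases PySem.List.foldl_max_mem t x with he | he
    · rw [he]; exact h x (by simp)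
    · exact h _ (List.mem_cons_of_mem _ he)

theorem feasB_eq_simA {diffs times : List Int} {limit level : Int}
    (hne : diffs ≠ []) (hlen : diffs.length ≤ times.length) :
    feasB diffs times limit level = simA diffs times limit level diffs.length 0 0 := by
  rw [simA_eq_F diffs times limit level hlen diffs.length 0 0 (by omega), List.drop_zero]
  set cs := costsB diffs times level with hcs
  have hlen' : cs.length = diffs.length := costsB_length hlen
  have hne' : cs ≠ [] := by
    intro h; apply hne
    have := congrArg List.length h
    simp [hlen'] at this
    exact this
  rw [Bool.eq_iff_iff]
  unfold feasB
  rw [← hcs, sumsB_eq, decide_eq_true_iff, Fctr_eq_true_iff]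
  rcases he : (List.range cs.length).map (fun j => (cs.take (j + 1)).sum) with _ | ⟨x, t⟩
  · exfalso
    have := congrArg List.length he
    simp at this
    exact hne' this
  · rw [max_le_iff_forall x t limit]
    rw [← he]
    simp only [List.mem_map, List.mem_range]
    constructor
    · intro h j hj
      have := h _ ⟨j, hj, rfl⟩
      omega
    · rintro h y ⟨j, hj, rfl⟩
      have := h j hj
      omega

theorem loop_eq_search (diffs times : List Int) (limit : Int)
    (hfe : ∀ lvl, feasB diffs times limit lvl = simA diffs times limit lvl diffs.length 0 0) :
    ∀ (fuel : Nat) (top down level : Int),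
      loopA diffs times limit fuel top down level = searchB diffs times limit fuel down top level := by
  intro fuel
  induction fuel with
  | zero => intro top down level; rfl
  | succ fuel ih =>
      intro top down level
      simp only [loopA, searchB]
      by_cases h : top ≥ down
      · rw [if_pos h, if_neg (show ¬ down > top by omega)]
        rw [show PySem.Int.floordiv (down + top) 2 = PySem.Int.floordiv (top + down) 2 by
          rw [add_comm]]
        rw [hfe]
        split_ifs with hs
        · exact ih _ _ _
        · exact ih _ _ _
      · rw [if_neg h, if_pos (show down > top by omega)]

-- ===== VERDICT (by name: the statement is the Claim_ definition above) =====
theorem solution_spec : Claim_equal_solution := by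
  intro diffs times limit _hdom hpre
  obtain ⟨hne, hlen⟩ := hpre
  unfold Spec_solution solution solution_alt
  exact loop_eq_search diffs times limit (fun lvl => feasB_eq_simA hne hlen) _ _ _ _
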